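-- pv_equiv track=rewrite | github.com/caiscoding/CS61A-Spring2022 | hws/hw03/hw03/hw03.py | pingpong
-- ===== SOURCE A (Python) =====
-- def num_eights(pos):
--     """Returns the number of times 8 appears as a digit of pos.
--
--     >>> num_eights(3)
--     0
--     >>> num_eights(8)
--     1
--     >>> num_eights(88888888)
--     8
--     >>> num_eights(2638)
--     1
--     >>> num_eights(86380)
--     2
--     >>> num_eights(12345)
--     0
--     >>> from construct_check import check
--     >>> # ban all assignment statements
--     >>> check(HW_SOURCE_FILE, 'num_eights',
--     ...       ['Assign', 'AnnAssign', 'AugAssign', 'NamedExpr'])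
--     True
--     """
--     "*** YOUR CODE HERE ***"
--     if pos < 10:
--         if pos == 8:
--             return 1
--         else:
--             return 0
--     elif pos % 10 == 8:
--         return 1 + num_eights(pos // 10)
--     else:
--         return 0 + num_eights(pos // 10)
--
-- def changtimes(n):
--     sum = 0
--     for i in range(1, n + 1):
--         if i % 8 == 0 or num_eights(i):
--             sum += 1
--     return sum
--
-- def pingpong(n):
--     """Return the nth element of the ping-pong sequence.
--
--     >>> pingpong(8)
--     8
--     >>> pingpong(10)
--     6
--     >>> pingpong(15)
--     1
--     >>> pingpong(21)
--     -1
--     >>> pingpong(22)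
--     -2
--     >>> pingpong(30)
--     -2
--     >>> pingpong(68)
--     0
--     >>> pingpong(69)
--     -1
--     >>> pingpong(80)
--     0
--     >>> pingpong(81)
--     1
--     >>> pingpong(82)
--     0
--     >>> pingpong(100)
--     -6
--     >>> from construct_check import check
--     >>> # ban assignment statements
--     >>> check(HW_SOURCE_FILE, 'pingpong',
--     ...       ['Assign', 'AnnAssign', 'AugAssign', 'NamedExpr'])
--     True
--     """
--     "*** YOUR CODE HERE ***"
--     if n == 1:
--         return 1
--     if changtimes(n) % 2 == 0:
--         if num_eights(n) or n % 8 == 0: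
--             return pingpong(n - 1) - 1
--         else:
--             return pingpong(n - 1) + 1
--     else:
--         if num_eights(n) or n % 8 == 0:
--             return pingpong(n - 1) + 1
--         else:
--             return pingpong(n - 1) - 1
-- ===== SOURCE B (Python) =====
-- def has_eight(i):
--     while i > 9:
--         if i % 10 == 8:
--             return True
--         i //= 10
--     return i == 8
--
-- def pingpong(n):
--     value, direction = 1, 1
--     for i in range(1, n):
--         if i % 8 == 0 or has_eight(i):
--             direction = -direction
--         value += direction
--     return value
-- ===== Notes on version B (the rewrite author's own statement) =====
-- stated objective: faster
-- what changed: replaces A's top-down recursion that recomputes changtimes (a full scan with per-element digit checks) at every step by a single forward loop that flips a direction flag at switch indices and accumulates the value incrementally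
-- outside the precondition, e.g. on pingpong(0): A raises RecursionError, B returns 1
import Mathlib
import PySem

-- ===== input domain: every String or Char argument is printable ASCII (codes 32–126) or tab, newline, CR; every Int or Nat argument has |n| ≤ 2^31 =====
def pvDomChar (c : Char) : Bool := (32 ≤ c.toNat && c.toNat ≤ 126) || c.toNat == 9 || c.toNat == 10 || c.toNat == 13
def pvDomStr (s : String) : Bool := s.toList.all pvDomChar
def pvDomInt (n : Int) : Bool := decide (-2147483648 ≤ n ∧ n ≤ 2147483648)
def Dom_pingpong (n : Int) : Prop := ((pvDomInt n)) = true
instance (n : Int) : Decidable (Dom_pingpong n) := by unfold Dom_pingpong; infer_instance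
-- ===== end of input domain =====

-- B replaces A's recursion with a full changtimes rescan at every step by one forward pass
-- that flips a direction flag incrementally (objective: faster; a timing run measures it).

-- ===== PORT A =====
def num_eights (pos : Int) : Int :=
  if pos < 10 then (if pos == 8 then 1 else 0)
  else if PySem.Int.mod pos 10 == 8 then 1 + num_eights (PySem.Int.floordiv pos 10)
  else 0 + num_eights (PySem.Int.floordiv pos 10)
termination_by pos.toNat
decreasing_by
  all_goals rw [PySem.Int.floordiv_eq_ediv_of_pos (by norm_num)]; omega

def changtimes (n : Int) : Int :=
  (PySem.List.pyRange 1 (n + 1) 1).foldl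
    (fun s i => if PySem.Int.mod i 8 == 0 || num_eights i != 0 then s + 1 else s) 0

-- Python's pingpong recurses n → n-1 and diverges for n ≤ 0; the port recurses on n.toNat,
-- which coincides with Python's recursion exactly on Pre_pingpong (1 ≤ n).
def pingpongNat : Nat → Int
  | 0 => 0
  | 1 => 1
  | (k + 2) =>
    if PySem.Int.mod (changtimes ((k : Int) + 2)) 2 == 0 then
      if num_eights ((k : Int) + 2) != 0 || PySem.Int.mod ((k : Int) + 2) 8 == 0 then
        pingpongNat (k + 1) - 1
      else
        pingpongNat (k + 1) + 1
    else
      if num_eights ((k : Int) + 2) != 0 || PySem.Int.mod ((k : Int) + 2) 8 == 0 then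
        pingpongNat (k + 1) + 1
      else
        pingpongNat (k + 1) - 1

def pingpong (n : Int) : Int := pingpongNat n.toNat

-- ===== PORT B =====
def has_eight (i : Int) : Bool :=
  if i > 9 then
    if PySem.Int.mod i 10 == 8 then true else has_eight (PySem.Int.floordiv i 10)
  else i == 8
termination_by i.toNat
decreasing_by
  all_goals rw [PySem.Int.floordiv_eq_ediv_of_pos (by norm_num)]; omega

def pingpong_alt (n : Int) : Int :=
  ((PySem.List.pyRange 1 n 1).foldl
    (fun (s : Int × Int) i =>
      let d := if PySem.Int.mod i 8 == 0 || has_eight i then -s.2 else s.2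
      (s.1 + d, d)) (1, 1)).1

-- ===== PRECONDITION & SPEC =====
-- Python's pingpong recurses without bound (RecursionError) for every n ≤ 0, so those inputs are excluded.
def Pre_pingpong (n : Int) : Prop := 1 ≤ n
instance (n : Int) : Decidable (Pre_pingpong n) := by unfold Pre_pingpong; infer_instance
def pvWitness_pingpong : Int := (3)

def Spec_pingpong (n : Int) (out : Int) : Prop := out = pingpong_alt n
instance (n : Int) (out : Int) : Decidable (Spec_pingpong n out) := by unfold Spec_pingpong; infer_instance

-- ===== CLAIM (what is proved, stated in full; the proofs are below) =====
def Claim_equal_pingpong : Prop := ∀ (n : Int), Dom_pingpong n → Pre_pingpong n → Spec_pingpong n (pingpong n)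

-- ===== LEMMAS AND PROOFS =====

theorem num_eights_nonneg (pos : Int) : 0 ≤ num_eights pos := by
  fun_induction num_eights pos
  all_goals omega

theorem has_eight_eq (i : Int) : has_eight i = (num_eights i != 0) := by
  fun_induction has_eight i with
  | case1 i h1 h2 =>
    rw [num_eights, if_neg (by omega), if_pos (by simpa using h2)]
    have := num_eights_nonneg (PySem.Int.floordiv i 10)
    symm
    rw [bne_iff_ne]
    omega
  | case2 i h1 h2 ih =>
    rw [num_eights, if_neg (by omega), if_neg (by simpa using h2)]
    simpa using ih
  | case3 i h1 =>
    rw [num_eights, if_pos (by omega)]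
    by_cases h : i = 8 <;> simp [h]

theorem changtimes_succ (k : Int) (hk : 0 ≤ k) :
    changtimes (k + 1) = changtimes k +
      (if PySem.Int.mod (k + 1) 8 == 0 || num_eights (k + 1) != 0 then 1 else 0) := by
  unfold changtimes
  rw [PySem.List.pyRange_one_succ_right (by omega), List.foldl_append]
  simp only [List.foldl_cons, List.foldl_nil]
  split <;> simp

theorem main_inv (m : Nat) :
    (PySem.List.pyRange 1 ((m : Int) + 1) 1).foldl
      (fun (s : Int × Int) i =>
        let d := if PySem.Int.mod i 8 == 0 || has_eight i then -s.2 else s.2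
        (s.1 + d, d)) (1, 1)
    = (pingpongNat (m + 1),
       if PySem.Int.mod (changtimes (m : Int)) 2 == 0 then 1 else -1) := by
  induction m with
  | zero => decide
  | succ m ih =>
    have hcast : (((m+1 : Nat) : Int)) + 1 = ((m : Int) + 1) + 1 := by push_cast; ring
    rw [hcast, PySem.List.pyRange_one_succ_right (by omega), List.foldl_append, ih]
    simp only [List.foldl_cons, List.foldl_nil, has_eight_eq]
    have hct1 := changtimes_succ ((m : Int)) (by omega)
    have hct2 := changtimes_succ ((m : Int) + 1) (by omega)
    have hcast2 : (((m+1 : Nat) : Int)) = (m : Int) + 1 := by push_cast; ring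
    rw [hcast2]
    have hpp : pingpongNat (m + 1 + 1) = pingpongNat (m + 2) := rfl
    rw [hpp]
    show (pingpongNat (m+1) + _, _) = _
    simp only [pingpongNat]
    have h2 : ((m : Int) + 1 + 1) = (m : Int) + 2 := by ring
    rw [h2] at hct2
    rw [Bool.or_comm (num_eights ((m : Int) + 2) != 0) (PySem.Int.mod ((m : Int) + 2) 8 == 0)]
    rw [hct2, hct1]
    simp only [PySem.Int.mod_eq_emod_of_pos (show (0:Int) < 2 by norm_num), beq_iff_eq]
    split_ifs <;> simp only [Prod.mk.injEq] <;> constructor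
    all_goals first | exact trivial | omega

-- ===== VERDICT (by name: the statement is the Claim_ definition above) =====
theorem pingpong_spec : Claim_equal_pingpong := by
  intro n _ hpre
  have h1 : 1 ≤ n := hpre
  unfold Spec_pingpong pingpong pingpong_alt
  obtain ⟨m, hm⟩ : ∃ m : Nat, n = (m : Int) + 1 := ⟨(n - 1).toNat, by omega⟩
  subst hm
  rw [main_inv m]
  have ht : ((m : Int) + 1).toNat = m + 1 := by omega
  rw [ht]
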